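-- pv_equiv track=rewrite | github.com/ParisanSH/Graph-Coloring-by-Genetic-algorithm | GA_GraphColoring.py | total_fitness
-- ===== SOURCE A (Python) =====
-- def total_fitness(graph,node):
--     n=node
--     counter=0
--     total_rank=0
--     while counter < n:
--         l=counter
--         for j in graph[l]:
--             if j==1:
--                 total_rank += 1000
--             else:
--                 total_rank +=10
--         counter +=1
--     return(total_rank)
-- ===== SOURCE B (Python) =====
-- def total_fitness(graph, node):
--     rows = graph[:max(node, 0)]
--     total_entries = sum(len(r) for r in rows)
--     ones = sum(r.count(1) for r in rows)
--     return 10 * total_entries + 990 * ones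
-- ===== Notes on version B (the rewrite author's own statement) =====
-- stated objective: simpler
-- what changed: Replaced the per-element branch-and-accumulate while/for loop by two aggregate counts over the first node rows (total entry count and count of 1-entries) combined in one closed-form expression 10*total_entries + 990*ones.
import Mathlib
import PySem

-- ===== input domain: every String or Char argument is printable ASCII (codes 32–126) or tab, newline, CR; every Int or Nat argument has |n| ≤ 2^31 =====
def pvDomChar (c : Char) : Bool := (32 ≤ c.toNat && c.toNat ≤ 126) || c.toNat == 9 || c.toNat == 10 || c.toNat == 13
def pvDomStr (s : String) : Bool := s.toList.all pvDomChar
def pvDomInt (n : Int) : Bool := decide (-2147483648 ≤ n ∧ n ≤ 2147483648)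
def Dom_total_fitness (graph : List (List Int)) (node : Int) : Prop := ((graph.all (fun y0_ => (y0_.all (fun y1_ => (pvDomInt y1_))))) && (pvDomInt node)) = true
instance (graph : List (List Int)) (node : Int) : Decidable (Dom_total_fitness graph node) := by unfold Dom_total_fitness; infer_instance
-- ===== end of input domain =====

-- B computes two aggregate counts (entries, ones) over the first node rows and combines
-- them in one closed-form expression, instead of A's per-element branch-and-accumulate loop.

-- ===== PORT A =====
-- the while loop: counter runs from 0 while counter < n; 'for j in graph[l]' is a foldl
-- over the row; pyGet? none = IndexError (excluded by Pre_, the port then stops with total).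
def tfLoop (graph : List (List Int)) (n counter total : Int) : Int :=
  if _h : counter < n then
    match PySem.List.pyGet? graph counter with
    | some row =>
        tfLoop graph n (counter + 1)
          (row.foldl (fun tr j => if j == 1 then tr + 1000 else tr + 10) total)
    | none => total
  else total
termination_by (n - counter).toNat
decreasing_by omega

def total_fitness (graph : List (List Int)) (node : Int) : Int :=
  tfLoop graph node 0 0

-- ===== PORT B =====
def total_fitness_alt (graph : List (List Int)) (node : Int) : Int :=
  let rows := graph.take ((max node 0).toNat)          -- graph[:max(node, 0)]
  let total_entries := (rows.map (fun r => (r.length : Int))).sum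
  let ones := (rows.map (fun r => (PySem.List.count r 1 : Int))).sum
  10 * total_entries + 990 * ones

-- ===== PRECONDITION & SPEC =====
-- Pre_: A indexes graph[l] for l = 0..node-1, so it raises IndexError iff node > len(graph).
def Pre_total_fitness (graph : List (List Int)) (node : Int) : Prop :=
  node ≤ (graph.length : Int)
instance (graph : List (List Int)) (node : Int) : Decidable (Pre_total_fitness graph node) := by
  unfold Pre_total_fitness; infer_instance

def pvWitness_total_fitness : List (List Int) × Int := ([[1, 0], [2, 1]], 2)

def Spec_total_fitness (graph : List (List Int)) (node : Int) (out : Int) : Prop :=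
  out = total_fitness_alt graph node
instance (graph : List (List Int)) (node : Int) (out : Int) : Decidable (Spec_total_fitness graph node out) := by
  unfold Spec_total_fitness; infer_instance

-- ===== CLAIM (what is proved, stated in full; the proofs are below) =====
def Claim_equal_total_fitness : Prop := ∀ (graph : List (List Int)) (node : Int), Dom_total_fitness graph node → Pre_total_fitness graph node → Spec_total_fitness graph node (total_fitness graph node)
-- ===== LEMMAS AND PROOFS =====

-- per-row contribution in B's decomposition
def rowG (r : List Int) : Int := 10 * (r.length : Int) + 990 * (r.count 1 : Int)

-- A's inner for-loop over a row adds exactly rowG r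
lemma row_fold (r : List Int) (acc : Int) :
    r.foldl (fun tr j => if j == 1 then tr + 1000 else tr + 10) acc = acc + rowG r := by
  induction r generalizing acc with
  | nil => simp [rowG]
  | cons x xs ih =>
      simp only [List.foldl_cons, ih, rowG, List.count_cons, List.length_cons]
      by_cases hx : x = 1
      · simp [hx]; ring
      · simp [hx]; ring

lemma tfLoop_eq (graph : List (List Int)) :
    ∀ (fuel : Nat) (n counter total : Int), (n - counter).toNat = fuel → 0 ≤ counter →
    n ≤ (graph.length : Int) →
    tfLoop graph n counter total
      = total + (((graph.take ((max n 0).toNat)).drop counter.toNat).map rowG).sum := by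
  intro fuel
  induction fuel with
  | zero =>
      intro n counter total hf hc hn
      have hcn : ¬ counter < n := by omega
      rw [tfLoop, dif_neg hcn]
      have hlen : (List.take ((max n 0).toNat) graph).length ≤ counter.toNat := by
        simp only [List.length_take]
        omega
      rw [List.drop_eq_nil_of_le hlen]
      simp
  | succ fuel ih =>
      intro n counter total hf hc hn
      have hcn : counter < n := by omega
      have hlt : counter.toNat < graph.length := by omega
      have hget : PySem.List.pyGet? graph counter = some graph[counter.toNat] := by
        have h1 := PySem.List.pyGet?_natCast graph counter.toNat
        rw [List.getElem?_eq_getElem hlt] at h1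
        rwa [show ((counter.toNat : Nat) : Int) = counter from by omega] at h1
      rw [tfLoop, dif_pos hcn, hget]
      dsimp only
      rw [row_fold]
      rw [ih n (counter + 1) _ (by omega) (by omega) hn]
      have hltt : counter.toNat < (List.take ((max n 0).toNat) graph).length := by
        simp only [List.length_take]; omega
      rw [List.drop_eq_getElem_cons hltt]
      simp only [List.map_cons, List.sum_cons, List.getElem_take]
      have : counter.toNat + 1 = (counter + 1).toNat := by omega
      rw [this]
      ring

-- B's two sums combine to the sum of per-row contributions
lemma alt_eq (graph : List (List Int)) (node : Int) :
    total_fitness_alt graph node = ((graph.take ((max node 0).toNat)).map rowG).sum := by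
  unfold total_fitness_alt
  generalize graph.take ((max node 0).toNat) = rows
  induction rows with
  | nil => simp
  | cons r rs ih =>
      simp only [List.map_cons, List.sum_cons] at *
      rw [← ih]
      simp [rowG, PySem.List.count_eq]
      ring

-- ===== VERDICT (by name: the statement is the Claim_ definition above) =====
theorem total_fitness_spec : Claim_equal_total_fitness := by
  intro graph node _ hpre
  unfold Spec_total_fitness total_fitness
  rw [tfLoop_eq graph (node - 0).toNat node 0 0 rfl (by omega) hpre]
  simp [alt_eq]
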